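-- pv_equiv track=rewrite | github.com/karvendhanm/DSA | generate_document.py | generateDocument
-- ===== SOURCE A (Python) =====
-- def generateDocument(characters, document):
--     # Write your code here.
--     if document == "":
--         return True
--
--     char_dict = {}
--     for _char in characters:
--         if _char not in char_dict:
--             char_dict[_char] = 0
--         char_dict[_char] += 1
--
--     for _char in document:
--         if _char not in char_dict or char_dict[_char] <= 0:
--             return False
--         char_dict[_char] -= 1
--     return True
--
-- characters = "Bste!hetsi ogEAxpelrt x "
--
-- document = "AlgoExpert is the Best!"
-- ===== SOURCE B (Python) =====
-- def generateDocument(characters, document):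
--     # Sort both strings and verify with a two-pointer merge scan that the
--     # sorted document is a sub-multiset of the sorted characters.
--     cs = sorted(characters)
--     ds = sorted(document)
--     i = 0
--     for d in ds:
--         while i < len(cs) and cs[i] < d:
--             i += 1
--         if i == len(cs) or cs[i] != d:
--             return False
--         i += 1
--     return True
-- ===== Notes on version B (the rewrite author's own statement) =====
-- stated objective: alternative
-- what changed: Replaces A's hash-count-and-decrement scheme by sorting both strings and checking sub-multiset inclusion with a two-pointer merge scan over the two sorted lists.
import Mathlib
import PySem

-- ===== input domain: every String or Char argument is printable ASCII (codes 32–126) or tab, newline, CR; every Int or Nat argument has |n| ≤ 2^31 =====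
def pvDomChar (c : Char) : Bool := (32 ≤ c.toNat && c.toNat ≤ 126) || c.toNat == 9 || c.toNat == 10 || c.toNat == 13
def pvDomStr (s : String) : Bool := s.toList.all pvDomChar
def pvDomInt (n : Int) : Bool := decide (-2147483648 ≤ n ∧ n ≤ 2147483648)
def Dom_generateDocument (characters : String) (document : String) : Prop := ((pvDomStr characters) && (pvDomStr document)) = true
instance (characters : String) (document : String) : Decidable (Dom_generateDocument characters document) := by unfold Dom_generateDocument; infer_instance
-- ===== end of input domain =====

-- B replaces A's count-and-decrement dict by sorting both strings and a two-pointer merge scan; objective: alternative.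

-- ===== PORT A =====
-- `if _char not in char_dict: char_dict[_char] = 0; char_dict[_char] += 1`
def gdBuild (d : PySem.Dict Char Int) (c : Char) : PySem.Dict Char Int :=
  let d1 := if d.contains c then d else d.insert c 0
  d1.insert c (d1.getD c 0 + 1)

-- the second loop: `if _char not in char_dict or char_dict[_char] <= 0: return False; char_dict[_char] -= 1`
def gdLoop (d : PySem.Dict Char Int) : List Char → Bool
  | [] => true
  | c :: rest =>
    if d.contains c = false ∨ d.getD c 0 ≤ 0 then false
    else gdLoop (d.insert c (d.getD c 0 - 1)) rest

def generateDocument (characters : String) (document : String) : Bool :=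
  if document = "" then true
  else gdLoop (characters.toList.foldl gdBuild PySem.Dict.empty) document.toList

-- ===== PORT B =====
-- the `for d in ds:` loop with its inner `while i < len(cs) and cs[i] < d: i += 1`
-- (the advancing index i is the consumed prefix of cs, so both pointers become list recursion)
def gdSub : List Char → List Char → Bool
  | [], _ => true
  | _ :: _, [] => false
  | d :: ds, c :: cs =>
    if c < d then gdSub (d :: ds) cs          -- inner while: skip cs[i] < d
    else if c = d then gdSub ds cs            -- match, i += 1, next d
    else false                                -- cs[i] > d: cs[i] != d
termination_by ds cs => ds.length + cs.length

-- `cs = sorted(characters); ds = sorted(document)` then the merge scan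
def generateDocument_alt (characters : String) (document : String) : Bool :=
  gdSub (PySem.List.sorted document.toList (fun x => x) false)
        (PySem.List.sorted characters.toList (fun x => x) false)

-- ===== PRECONDITION & SPEC =====
def Spec_generateDocument (characters : String) (document : String) (out : Bool) : Prop := out = generateDocument_alt characters document
instance (characters : String) (document : String) (out : Bool) : Decidable (Spec_generateDocument characters document out) := by unfold Spec_generateDocument; infer_instance

-- ===== CLAIM =====
def Claim_equal_generateDocument : Prop := ∀ (characters : String) (document : String), Dom_generateDocument characters document → Spec_generateDocument characters document (generateDocument characters document)

-- ===== LEMMAS AND PROOFS =====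

-- A's builder increments the count of c and leaves everything else.
theorem getD_gdBuild (d : PySem.Dict Char Int) (c v : Char) :
    (gdBuild d c).getD v 0 = if v = c then d.getD v 0 + 1 else d.getD v 0 := by
  unfold gdBuild
  by_cases h : d.contains c = true
  · simp only [h, if_true, PySem.Dict.getD_insert]
    by_cases hv : v = c <;> simp [hv]
  · have h' : d.contains c = false := by simpa using h
    rw [if_neg h]
    simp only [PySem.Dict.getD_insert]
    by_cases hv : v = c <;> simp [hv, PySem.Dict.getD_of_not_contains d 0 h']

theorem getD_foldl_gdBuild (l : List Char) (d : PySem.Dict Char Int) (v : Char) :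
    (l.foldl gdBuild d).getD v 0 = d.getD v 0 + l.count v := by
  induction l generalizing d with
  | nil => simp
  | cons c rest ih =>
      rw [List.foldl_cons, ih, getD_gdBuild]
      by_cases h : v = c
      · subst h
        rw [if_pos rfl, List.count_cons_self]
        push_cast
        ring
      · rw [if_neg h]
        have hcc : List.count v (c :: rest) = List.count v rest := by
          simp [Ne.symm h]
        rw [hcc]

-- A's document loop succeeds iff no character is over-demanded, for a supply dict
-- with non-negative values.
theorem gdLoop_eq (l : List Char) (d : PySem.Dict Char Int)
    (hnn : ∀ v, 0 ≤ d.getD v 0) :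
    gdLoop d l = true ↔ ∀ v, (l.count v : Int) ≤ d.getD v 0 := by
  induction l generalizing d with
  | nil =>
      constructor
      · intro _ v; simpa using hnn v
      · intro _; rfl
  | cons c rest ih =>
      by_cases hc : d.getD c 0 ≤ 0
      · have hfalse : gdLoop d (c :: rest) = false := by
          rw [show gdLoop d (c :: rest)
                = if d.contains c = false ∨ d.getD c 0 ≤ 0 then false
                  else gdLoop (d.insert c (d.getD c 0 - 1)) rest from rfl,
             if_pos (Or.inr hc)]
        rw [hfalse]
        simp only [Bool.false_eq_true, false_iff]
        intro h
        have hcount := h c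
        rw [List.count_cons_self] at hcount
        push_cast at hcount
        omega
      · have hcon : d.contains c = true := by
          by_contra hfc
          have h' : d.contains c = false := by simpa using hfc
          have := PySem.Dict.getD_of_not_contains d 0 h'
          omega
        have hstep : gdLoop d (c :: rest) = gdLoop (d.insert c (d.getD c 0 - 1)) rest := by
          rw [show gdLoop d (c :: rest)
                = if d.contains c = false ∨ d.getD c 0 ≤ 0 then false
                  else gdLoop (d.insert c (d.getD c 0 - 1)) rest from rfl]
          rw [if_neg]
          rintro (hbad | hbad)
          · rw [hcon] at hbad; cases hbad
          · omega
        have hnn' : ∀ v, 0 ≤ (d.insert c (d.getD c 0 - 1)).getD v 0 := by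
          intro v
          rw [PySem.Dict.getD_insert]
          by_cases hvc : v = c
          · rw [if_pos hvc]; omega
          · rw [if_neg hvc]; exact hnn v
        rw [hstep, ih _ hnn']
        constructor
        · intro h v
          have hv := h v
          rw [PySem.Dict.getD_insert] at hv
          by_cases hvc : v = c
          · subst hvc
            rw [if_pos rfl] at hv
            rw [List.count_cons_self]
            push_cast
            omega
          · rw [if_neg hvc] at hv
            have hcc : List.count v (c :: rest) = List.count v rest := by
              simp [Ne.symm hvc]
            rw [hcc]
            exact hv
        · intro h v
          rw [PySem.Dict.getD_insert]
          by_cases hvc : v = c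
          · subst hvc
            rw [if_pos rfl]
            have hv := h v
            rw [List.count_cons_self] at hv
            push_cast at hv
            omega
          · rw [if_neg hvc]
            have hv := h v
            have hcc : List.count v (c :: rest) = List.count v rest := by
              simp [Ne.symm hvc]
            rw [hcc] at hv
            exact hv

-- B's merge scan on two sorted lists decides sub-multiset inclusion.
theorem gdSub_eq (ds cs : List Char)
    (hd : ds.Pairwise (· ≤ ·)) (hc : cs.Pairwise (· ≤ ·)) :
    gdSub ds cs = true ↔ ∀ v, ds.count v ≤ cs.count v := by
  induction ds, cs using gdSub.induct with
  | case1 cs =>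
      simp [gdSub]
  | case2 d ds =>
      simp only [gdSub, Bool.false_eq_true, false_iff]
      intro h
      have := h d
      simp [List.count_cons_self] at this
  | case3 d ds c cs hlt ih =>
      rw [show gdSub (d :: ds) (c :: cs) = gdSub (d :: ds) cs by
            simp [gdSub, hlt]]
      have hc' : cs.Pairwise (· ≤ ·) := hc.tail
      rw [ih hd hc']
      have hnotmem : c ∉ d :: ds := by
        intro hm
        have hle : d ≤ c := by
          rcases List.mem_cons.mp hm with rfl | hm'
          · exact le_refl _
          · exact (List.pairwise_cons.mp hd).1 c hm'
        exact absurd (lt_of_lt_of_le hlt hle) (lt_irrefl _)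
      constructor
      · intro h v
        calc (d :: ds).count v ≤ cs.count v := h v
          _ ≤ (c :: cs).count v := by simp [List.count_cons]
      · intro h v
        by_cases hvc : v = c
        · subst hvc
          have : (d :: ds).count v = 0 := List.count_eq_zero.mpr hnotmem
          omega
        · have := h v
          rwa [List.count_cons_of_ne (Ne.symm hvc)] at this
  | case4 ds c cs hnlt ih =>
      rw [show gdSub (c :: ds) (c :: cs) = gdSub ds cs by
            simp [gdSub]]
      rw [ih hd.tail hc.tail]
      constructor
      · intro h v
        simp only [List.count_cons]
        have := h v
        omega
      · intro h v
        have := h v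
        simp only [List.count_cons] at this
        omega
  | case5 d ds c cs hnlt hne =>
      simp only [gdSub, if_neg hnlt, if_neg hne, Bool.false_eq_true, false_iff]
      intro h
      have hdc : d < c := lt_of_le_of_ne (not_lt.mp hnlt) (fun e => hne e.symm)
      have hnm : d ∉ c :: cs := by
        intro hm
        have hle : c ≤ d := by
          rcases List.mem_cons.mp hm with rfl | hm'
          · exact le_refl _
          · exact (List.pairwise_cons.mp hc).1 d hm'
        exact absurd (lt_of_lt_of_le hdc hle) (lt_irrefl _)
      have h0 : (c :: cs).count d = 0 := List.count_eq_zero.mpr hnm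
      have := h d
      rw [List.count_cons_self, h0] at this
      omega

-- B returns true iff no character of the document is over-demanded.
theorem alt_eq (characters document : String) :
    generateDocument_alt characters document = true ↔
      ∀ v, document.toList.count v ≤ characters.toList.count v := by
  unfold generateDocument_alt
  rw [gdSub_eq _ _
        (by simpa using PySem.List.sorted_pairwise document.toList (fun x => x))
        (by simpa using PySem.List.sorted_pairwise characters.toList (fun x => x))]
  constructor
  · intro h v
    have := h v
    rwa [(PySem.List.sorted_perm document.toList (fun x => x) false).count_eq,
         (PySem.List.sorted_perm characters.toList (fun x => x) false).count_eq] at this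
  · intro h v
    rw [(PySem.List.sorted_perm document.toList (fun x => x) false).count_eq,
        (PySem.List.sorted_perm characters.toList (fun x => x) false).count_eq]
    exact h v

theorem getD_empty_char (v : Char) : (PySem.Dict.empty : PySem.Dict Char Int).getD v 0 = 0 := rfl

theorem generateDocument_eq_alt (characters document : String) :
    generateDocument characters document = generateDocument_alt characters document := by
  by_cases hdoc : document = ""
  · subst hdoc
    have h : generateDocument_alt characters "" = true := by
      rw [alt_eq]
      intro v
      have hnil : ("" : String).toList = [] := rfl
      rw [hnil]
      simp
    have hA : generateDocument characters "" = true := by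
      unfold generateDocument
      rw [if_pos rfl]
    rw [hA, h]
  · unfold generateDocument
    rw [if_neg hdoc]
    have hnn : ∀ v, 0 ≤ (characters.toList.foldl gdBuild PySem.Dict.empty).getD v 0 := by
      intro v
      rw [getD_foldl_gdBuild, getD_empty_char]
      simp
    apply Bool.eq_iff_iff.mpr
    rw [gdLoop_eq _ _ hnn, alt_eq]
    constructor
    · intro h v
      have := h v
      rw [getD_foldl_gdBuild, getD_empty_char, zero_add] at this
      exact_mod_cast this
    · intro h v
      rw [getD_foldl_gdBuild, getD_empty_char, zero_add]
      exact_mod_cast h v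

-- ===== VERDICT =====
theorem generateDocument_spec : Claim_equal_generateDocument := by
  intro characters document _
  exact generateDocument_eq_alt characters document
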